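-- pv_equiv track=rewrite | github.com/ModernMAK/FileTagServer | src/database_api/database_search.py | create_simple_search_groups
-- ===== SOURCE A (Python) =====
-- from typing import List, Tuple, Union, Dict, Any
--
-- SEARCH_NOT = '-'
--
-- SEARCH_AND = ''
--
-- SEARCH_OR = '~'
--
-- SimpleSearchGroups = Tuple[List[str], List[str], List[str], Dict[str, Any]]
--
-- def create_simple_search_groups(search: List[str]) -> SimpleSearchGroups:
--     KW_Untagged = 'untagged'
--     keywords = [KW_Untagged]
--     nots = []
--     ands = []
--     ors = []
--     kwargs = {}
--
--     def handle_kwarg(text: str):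
--         if text == KW_Untagged:
--             kwargs['include_untagged'] = True
--
--     for item in search:
--         if item.lower() in keywords:
--             handle_kwarg(item)
--         else:
--             if item[0] == SEARCH_NOT:
--                 nots.append(item[1:])
--             elif item[0] == SEARCH_OR:
--                 ors.append(item[1:])
--             elif item[0] == SEARCH_AND:
--                 ands.append(item[1:])
--             else:
--                 ands.append(item)
--     return ors, ands, nots, kwargs
-- ===== SOURCE B (Python) =====
-- def create_simple_search_groups(search):
--     KW_Untagged = 'untagged'
--     rest = [x for x in search if x.lower() != KW_Untagged]
--     nots = [x[1:] for x in rest if x[0] == '-']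
--     ors = [x[1:] for x in rest if x[0] == '~']
--     ands = [x for x in rest if x[0] not in ('-', '~')]
--     kwargs = {'include_untagged': True} if KW_Untagged in search else {}
--     return ors, ands, nots, kwargs
-- ===== Notes on version B (the rewrite author's own statement) =====
-- stated objective: simpler
-- what changed: Replaces the single-pass branch dispatch with an accumulator-free decomposition: filter out case-insensitive 'untagged' once, then build nots/ors/ands by separate filtered comprehensions and the kwargs dict by a direct membership test.
import Mathlib
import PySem

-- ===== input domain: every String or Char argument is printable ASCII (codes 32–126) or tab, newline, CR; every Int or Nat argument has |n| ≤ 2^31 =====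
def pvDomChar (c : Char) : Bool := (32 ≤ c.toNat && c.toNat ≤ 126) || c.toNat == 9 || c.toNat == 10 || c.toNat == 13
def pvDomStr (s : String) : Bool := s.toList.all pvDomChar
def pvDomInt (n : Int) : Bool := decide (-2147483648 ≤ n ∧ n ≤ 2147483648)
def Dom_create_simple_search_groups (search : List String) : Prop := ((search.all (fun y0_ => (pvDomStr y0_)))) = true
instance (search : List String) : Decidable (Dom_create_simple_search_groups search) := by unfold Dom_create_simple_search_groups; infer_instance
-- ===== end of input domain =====

-- B rebuilds the four groups by separate filtered comprehensions instead of A's single accumulator loop (objective: simpler).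

-- ===== PORT A =====
def SEARCH_NOT : String := "-"
def SEARCH_AND : String := ""
def SEARCH_OR : String := "~"

-- def handle_kwarg(text): if text == KW_Untagged: kwargs['include_untagged'] = True
def csgHandleKwarg (kwargs : PySem.Dict String Bool) (text : String) : PySem.Dict String Bool :=
  if text = "untagged" then kwargs.insert "include_untagged" true else kwargs

-- one iteration of A's for-loop over state (nots, ands, ors, kwargs); Python's item[0] raises
-- IndexError on "" (pyGet? = none): the port leaves the state unchanged there (outside Pre_).
def csgStep (st : List String × List String × List String × PySem.Dict String Bool) (item : String) :
    List String × List String × List String × PySem.Dict String Bool :=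
  let (nots, ands, ors, kwargs) := st
  if PySem.Str.lower item ∈ (["untagged"] : List String) then
    (nots, ands, ors, csgHandleKwarg kwargs item)
  else
    match PySem.Str.pyGet? item 0 with
    | none => st
    | some c =>
      let c0 : String := String.ofList [c]   -- item[0], a one-character string
      if c0 = SEARCH_NOT then (nots ++ [PySem.Str.slice item (some 1) none], ands, ors, kwargs)
      else if c0 = SEARCH_OR then (nots, ands, ors ++ [PySem.Str.slice item (some 1) none], kwargs)
      else if c0 = SEARCH_AND then (nots, ands ++ [PySem.Str.slice item (some 1) none], ors, kwargs)
      else (nots, ands ++ [item], ors, kwargs)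

def create_simple_search_groups (search : List String) : List String × List String × List String × (List (String × Bool)) :=
  let st := search.foldl csgStep ([], [], [], PySem.Dict.empty)
  (st.2.2.1, st.2.1, st.1, st.2.2.2.items)

-- ===== PORT B =====
def csgRest (search : List String) : List String :=
  search.filter (fun x => !(PySem.Str.lower x == "untagged"))

def csgNots (rest : List String) : List String :=
  (rest.filter (fun x => PySem.Str.pyGet? x 0 == some '-')).map (fun x => PySem.Str.slice x (some 1) none)

def csgOrs (rest : List String) : List String :=
  (rest.filter (fun x => PySem.Str.pyGet? x 0 == some '~')).map (fun x => PySem.Str.slice x (some 1) none)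

def csgAnds (rest : List String) : List String :=
  rest.filter (fun x => !(PySem.Str.pyGet? x 0 == some '-' || PySem.Str.pyGet? x 0 == some '~'))

def create_simple_search_groups_alt (search : List String) : List String × List String × List String × (List (String × Bool)) :=
  let rest := csgRest search
  let kwargs : List (String × Bool) := if search.contains "untagged" then [("include_untagged", true)] else []
  (csgOrs rest, csgAnds rest, csgNots rest, kwargs)

-- ===== PRECONDITION & SPEC =====
-- Pre_ excludes exactly the inputs containing the empty string, on which A (and B) raise IndexError at item[0].
def Pre_create_simple_search_groups (search : List String) : Prop := "" ∉ search
instance (search : List String) : Decidable (Pre_create_simple_search_groups search) := by unfold Pre_create_simple_search_groups; infer_instance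
def pvWitness_create_simple_search_groups : List String := ["~dog", "-cat", "untagged", "Untagged", "fish"]

def Spec_create_simple_search_groups (search : List String) (out : List String × List String × List String × (List (String × Bool))) : Prop := out = create_simple_search_groups_alt search
instance (search : List String) (out : List String × List String × List String × (List (String × Bool))) : Decidable (Spec_create_simple_search_groups search out) := by unfold Spec_create_simple_search_groups; infer_instance

-- ===== CLAIM (what is proved, stated in full; the proofs are below) =====
def Claim_equal_create_simple_search_groups : Prop := ∀ (search : List String), Dom_create_simple_search_groups search → Pre_create_simple_search_groups search → Spec_create_simple_search_groups search (create_simple_search_groups search)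

-- ===== LEMMAS AND PROOFS =====

-- kwargs state as a function of whether 'untagged' has been seen
def kwD (b : Bool) : PySem.Dict String Bool :=
  PySem.Dict.mk (if b then [("include_untagged", true)] else [])

lemma handle_kwarg_kwD (b : Bool) (x : String) :
    csgHandleKwarg (kwD b) x = kwD (b || (x == "untagged")) := by
  unfold csgHandleKwarg
  by_cases hx : x = "untagged"
  · subst hx; cases b <;> decide
  · have hb : (x == "untagged") = false := by simp [hx]
    simp [hx, hb]

lemma ofList_single_eq (c : Char) (s : String) : (String.ofList [c] = s) ↔ s.toList = [c] := by
  rw [String.ext_iff]; simp [eq_comm]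

lemma loopA (search : List String) (h : "" ∉ search) (n a o : List String) (b : Bool) :
    search.foldl csgStep (n, a, o, kwD b) =
      (n ++ csgNots (csgRest search), a ++ csgAnds (csgRest search),
       o ++ csgOrs (csgRest search), kwD (b || search.contains "untagged")) := by
  induction search generalizing n a o b with
  | nil => simp [csgRest, csgNots, csgAnds, csgOrs]
  | cons x xs ih =>
    have hx : x ≠ "" := fun hxe => h (hxe ▸ List.mem_cons_self ..)
    have hxs : "" ∉ xs := fun hm => h (List.mem_cons_of_mem _ hm)
    rw [List.foldl_cons]
    by_cases hl : PySem.Str.lower x = "untagged"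
    · -- keyword branch: x is filtered out of rest, may set the kwarg
      have hstep : csgStep (n, a, o, kwD b) x = (n, a, o, kwD (b || (x == "untagged"))) := by
        simp [csgStep, hl, handle_kwarg_kwD]
      have hrest : csgRest (x :: xs) = csgRest xs := by
        simp [csgRest, hl]
      rw [hstep, ih hxs, hrest]
      by_cases hxe : x = "untagged"
      · subst hxe; simp
      · have : (x == "untagged") = false := by simp [hxe]
        simp [this, Ne.symm hxe]
    · -- x is a real term; x ≠ "" so x[0] = some c
      obtain ⟨c, cs, hxl⟩ : ∃ c cs, x.toList = c :: cs := by
        cases hxl : x.toList with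
        | nil => exact absurd (String.toList_eq_nil_iff.mp hxl) hx
        | cons c cs => exact ⟨c, cs, rfl⟩
      have hget : PySem.Str.pyGet? x 0 = some c := by
        have h0 : PySem.Str.pyGet? x ((0 : Nat) : Int) = x.toList[(0 : Nat)]? := PySem.Str.pyGet?_natCast x 0
        rw [hxl] at h0; simpa using h0
      have hget' : PySem.List.pyGet? x.toList 0 = some c := by
        simpa using hget
      have hxu : x ≠ "untagged" := by
        intro hxe; exact hl (by rw [hxe]; decide)
      have hcontains : (x :: xs).contains "untagged" = xs.contains "untagged" := by
        simp [Ne.symm hxu]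
      have hrest : csgRest (x :: xs) = x :: csgRest xs := by
        simp [csgRest, hl]
      have hstep : csgStep (n, a, o, kwD b) x =
          (if c = '-' then (n ++ [PySem.Str.slice x (some 1) none], a, o, kwD b)
           else if c = '~' then (n, a, o ++ [PySem.Str.slice x (some 1) none], kwD b)
           else (n, a ++ [x], o, kwD b)) := by
        simp only [csgStep, List.mem_cons, List.not_mem_nil, or_false, if_neg hl, hget]
        by_cases h1 : c = '-'
        · subst h1; simp [SEARCH_NOT]
        · by_cases h2 : c = '~'
          · subst h2; simp [SEARCH_NOT, SEARCH_OR]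
          · simp only [ofList_single_eq, SEARCH_NOT, SEARCH_OR, SEARCH_AND]
            have e1 : ("-" : String).toList = ['-'] := by decide
            have e2 : ("~" : String).toList = ['~'] := by decide
            have e3 : ("" : String).toList = [] := by decide
            simp [e1, e2, e3, h1, h2, Ne.symm h1, Ne.symm h2]
      rw [hstep, hcontains, hrest]
      by_cases h1 : c = '-'
      · subst h1
        rw [if_pos rfl, ih hxs (n ++ [PySem.Str.slice x (some 1) none]) a o b]
        simp [csgNots, csgAnds, csgOrs, hget']
      · by_cases h2 : c = '~'
        · subst h2
          rw [if_neg h1, if_pos rfl, ih hxs n a (o ++ [PySem.Str.slice x (some 1) none]) b]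
          simp [csgNots, csgAnds, csgOrs, hget']
        · rw [if_neg h1, if_neg h2, ih hxs n (a ++ [x]) o b]
          simp [csgNots, csgAnds, csgOrs, hget', h1, h2]

-- ===== VERDICT (by name: the statement is the Claim_ definition above) =====
theorem create_simple_search_groups_spec : Claim_equal_create_simple_search_groups := by
  intro search _ hpre
  unfold Spec_create_simple_search_groups create_simple_search_groups create_simple_search_groups_alt
  have h0 : (([], [], [], PySem.Dict.empty) : List String × List String × List String × PySem.Dict String Bool) = ([], [], [], kwD false) := by decide
  rw [h0, loopA search hpre]
  by_cases hc : search.contains "untagged" <;> simp [kwD]
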